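-- pv_equiv track=rewrite | github.com/syogod/HackMind | hackmind/ui/panels/asset_panel.py | _group_by_name
-- ===== SOURCE A (Python) =====
-- def _parse_version(v: str) -> tuple:
--     """
--     Parse a version string into a tuple of ints for ordering comparisons.
--     Non-numeric segments are treated as 0. e.g. "1.2.3" → (1, 2, 3).
--     """
--     parts = []
--     for p in v.strip().split("."):
--         try:
--             parts.append(int(p))
--         except ValueError:
--             parts.append(0)
--     return tuple(parts)
--
-- def _group_by_name(templates: list[dict]) -> dict[str, list[dict]]:
--     """Group templates by name; within each group sort by version descending."""
--     groups: dict[str, list[dict]] = {}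
--     for t in templates:
--         groups.setdefault(t["name"], []).append(t)
--     return {
--         name: sorted(versions, key=lambda t: _parse_version(t["version"]), reverse=True)
--         for name, versions in sorted(groups.items(), key=lambda kv: kv[0].lower())
--     }
-- ===== SOURCE B (Python) =====
-- def _parse_version(v: str) -> tuple:
--     parts = []
--     for p in v.strip().split("."):
--         try:
--             parts.append(int(p))
--         except ValueError:
--             parts.append(0)
--     return tuple(parts)
--
-- def _group_by_name(templates: list[dict]) -> dict[str, list[dict]]:
--     """Sort the whole list once by version descending, then distribute the
--     templates into buckets pre-ordered by lowercased name (stable on first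
--     appearance)."""
--     by_ver = sorted(templates, key=lambda t: _parse_version(t["version"]), reverse=True)
--     names = sorted(dict.fromkeys(t["name"] for t in templates), key=str.lower)
--     out = {name: [] for name in names}
--     for t in by_ver:
--         out[t["name"]].append(t)
--     return out
-- ===== Notes on version B (the rewrite author's own statement) =====
-- stated objective: alternative
-- what changed: Instead of bucketing into a dict and sorting each bucket, B stably sorts the whole list once by version descending, computes the group-key order separately (ordered dedup of names sorted by lowercase), and distributes the sorted templates into pre-seeded empty buckets in one pass.
import Mathlib
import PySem

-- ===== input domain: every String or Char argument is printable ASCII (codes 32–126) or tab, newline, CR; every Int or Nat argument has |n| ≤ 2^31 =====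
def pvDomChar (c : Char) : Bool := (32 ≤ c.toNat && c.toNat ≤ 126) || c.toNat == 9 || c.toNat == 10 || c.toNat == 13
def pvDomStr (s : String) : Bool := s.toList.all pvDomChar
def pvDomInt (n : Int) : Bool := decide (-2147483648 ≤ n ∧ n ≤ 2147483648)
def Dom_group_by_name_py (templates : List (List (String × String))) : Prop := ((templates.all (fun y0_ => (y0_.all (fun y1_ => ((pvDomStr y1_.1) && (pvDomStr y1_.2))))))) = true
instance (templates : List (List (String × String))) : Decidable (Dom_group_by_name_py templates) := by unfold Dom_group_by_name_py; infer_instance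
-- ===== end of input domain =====

-- B replaces A's bucket-then-sort-each-group with one global stable sort by version
-- descending plus a separately computed key order, distributing in a single pass
-- (objective: alternative decomposition; equivalence of the RETURN value is proved).

-- ===== PORT A =====
-- t[k]; exact whenever k is a key of t — Pre_ admits only such inputs (Python raises KeyError otherwise)
def pvGet (t : List (String × String)) (k : String) : String :=
  ((PySem.Dict.mk t).get? k).getD ""

-- _parse_version: loop appending int(p) (ValueError caught → 0); split? is none only for sep = "", and "." ≠ ""
def parse_version_py (v : String) : List Int :=
  ((PySem.Str.split? (PySem.Str.strip v) ".").getD []).foldl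
    (fun parts p => parts ++ [(PySem.Int.ofStr? p).getD 0]) []

-- the sort key lambda t: _parse_version(t["version"]) (shared by both Pythons)
def pvVKey (t : List (String × String)) : List Int := parse_version_py (pvGet t "version")

def group_by_name_py (templates : List (List (String × String))) : List (String × List (List (String × String))) :=
  -- groups.setdefault(t["name"], []).append(t)  ≡  d[t["name"]] = d.get(t["name"], []) + [t]
  let groups := templates.foldl
    (fun d t => d.modify (pvGet t "name") [] (fun vs => vs ++ [t]))
    (PySem.Dict.empty : PySem.Dict String (List (List (String × String))))
  (PySem.Dict.ofList
    ((PySem.List.sorted groups.items (fun kv => PySem.Str.lower kv.1) false).map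
      (fun kv => (kv.1, PySem.List.sorted kv.2 pvVKey true)))).items

-- ===== PORT B =====
def group_by_name_py_alt (templates : List (List (String × String))) : List (String × List (List (String × String))) :=
  let by_ver := PySem.List.sorted templates pvVKey true
  let names := PySem.List.sorted (PySem.List.dedup (templates.map (fun t => pvGet t "name")))
    (fun n => PySem.Str.lower n) false
  let out0 := names.foldl (fun d n => d.insert n [])
    (PySem.Dict.empty : PySem.Dict String (List (List (String × String))))
  -- out[t["name"]].append(t): the key is always present, so this is d[k] = d.get(k, []) + [t]
  let out := by_ver.foldl (fun d t => d.modify (pvGet t "name") [] (fun vs => vs ++ [t])) out0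
  out.items

-- ===== PRECONDITION & SPEC =====
-- Pre_ excludes exactly the inputs where Python A raises KeyError: a template missing key "name" or "version"
def Pre_group_by_name_py (templates : List (List (String × String))) : Prop :=
  ∀ t ∈ templates, (PySem.Dict.mk t).contains "name" = true ∧ (PySem.Dict.mk t).contains "version" = true
instance (templates : List (List (String × String))) : Decidable (Pre_group_by_name_py templates) := by unfold Pre_group_by_name_py; infer_instance

def pvWitness_group_by_name_py : (List (List (String × String))) :=
  [[("name", "a"), ("version", "1.2")], [("name", "a"), ("version", "2")]]

def Spec_group_by_name_py (templates : List (List (String × String))) (out : List (String × List (List (String × String)))) : Prop := out = group_by_name_py_alt templates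
instance (templates : List (List (String × String))) (out : List (String × List (List (String × String)))) : Decidable (Spec_group_by_name_py templates out) := by unfold Spec_group_by_name_py; infer_instance

-- ===== CLAIM (what is proved, stated in full; the proofs are below) =====
def Claim_equal_group_by_name_py : Prop := ∀ (templates : List (List (String × String))), Dom_group_by_name_py templates → Pre_group_by_name_py templates → Spec_group_by_name_py templates (group_by_name_py templates)

-- ===== LEMMAS AND PROOFS =====

theorem pvInsertBy_cons_of_head {α : Type} (b : α → α → Bool) (x : α) (l : List α)
    (h : ∀ z ∈ l, b x z = true) : PySem.List.insertBy b x l = x :: l := by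
  cases l with
  | nil => rfl
  | cons y ys => simp [PySem.List.insertBy, h y (by simp)]

theorem pvFilter_insertBy_neg {α : Type} (b : α → α → Bool) (p : α → Bool) (x : α)
    (hx : p x = false) : ∀ l : List α,
    (PySem.List.insertBy b x l).filter p = l.filter p
  | [] => by simp [PySem.List.insertBy, hx]
  | y :: ys => by
      by_cases hb : b x y = true
      · simp [PySem.List.insertBy, hb, hx]
      · simp [PySem.List.insertBy, hb, List.filter_cons, pvFilter_insertBy_neg b p x hx ys]

theorem pvFilter_insertBy_pos {α κ : Type} [LT κ] [DecidableLT κ] (key : α → κ)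
    (Hlelt : ∀ a b c : κ, ¬ b < a → b < c → a < c)
    (p : α → Bool) (x : α) (hx : p x = true) : ∀ l : List α,
    l.Pairwise (fun u v => ¬ key u < key v) →
    (PySem.List.insertBy (fun a b => decide (key b < key a)) x l).filter p
      = PySem.List.insertBy (fun a b => decide (key b < key a)) x (l.filter p)
  | [], _ => by simp [PySem.List.insertBy, hx]
  | y :: ys, hpw => by
      rcases List.pairwise_cons.mp hpw with ⟨hy, hys⟩
      by_cases hb : key y < key x
      · by_cases hpy : p y = true
        · simp [PySem.List.insertBy, hb, hx, hpy]
        · have hfy : (y :: ys).filter p = ys.filter p := by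
            simp [hpy]
          have hins : PySem.List.insertBy (fun a b => decide (key b < key a)) x (ys.filter p)
              = x :: ys.filter p := by
            apply pvInsertBy_cons_of_head
            intro z hz
            have hzys : z ∈ ys := List.mem_of_mem_filter hz
            exact decide_eq_true (Hlelt (key z) (key y) (key x) (hy z hzys) hb)
          simp [PySem.List.insertBy, hb, hx, hfy, hins]
      · have hih := pvFilter_insertBy_pos key Hlelt p x hx ys hys
        by_cases hpy : p y = true
        · simp [PySem.List.insertBy, hb, hpy, hih]
        · simp [PySem.List.insertBy, hb, hpy, hih]

theorem pvPairwise_insertBy {α κ : Type} [LT κ] [DecidableLT κ] (key : α → κ)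
    (Hasym : ∀ a b : κ, a < b → ¬ b < a)
    (Hlelt : ∀ a b c : κ, ¬ b < a → b < c → a < c)
    (x : α) : ∀ l : List α, l.Pairwise (fun u v => ¬ key u < key v) →
    (PySem.List.insertBy (fun a b => decide (key b < key a)) x l).Pairwise
      (fun u v => ¬ key u < key v)
  | [], _ => by simp [PySem.List.insertBy]
  | y :: ys, hpw => by
      rcases List.pairwise_cons.mp hpw with ⟨hy, hys⟩
      by_cases hb : key y < key x
      · have h1 : ∀ z ∈ y :: ys, ¬ key x < key z := by
          intro z hz
          rcases List.mem_cons.mp hz with rfl | hz'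
          · exact Hasym _ _ hb
          · exact Hasym _ _ (Hlelt (key z) (key y) (key x) (hy z hz') hb)
        simp only [PySem.List.insertBy, decide_eq_true hb, if_true]
        exact List.pairwise_cons.mpr ⟨h1, hpw⟩
      · simp only [PySem.List.insertBy, decide_eq_false hb]
        refine List.pairwise_cons.mpr ⟨?_, pvPairwise_insertBy key Hasym Hlelt x ys hys⟩
        intro z hz
        rcases (PySem.List.mem_insertBy _ x z ys).mp hz with rfl | hz'
        · exact hb
        · exact hy z hz'

theorem pvFoldl_ins_filter {α κ : Type} [LT κ] [DecidableLT κ] (key : α → κ)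
    (Hasym : ∀ a b : κ, a < b → ¬ b < a)
    (Hlelt : ∀ a b c : κ, ¬ b < a → b < c → a < c)
    (p : α → Bool) :
    ∀ (xs : List α) (acc : List α), acc.Pairwise (fun u v => ¬ key u < key v) →
    (xs.foldl (fun acc x => PySem.List.insertBy (fun a b => decide (key b < key a)) x acc) acc).filter p
      = (xs.filter p).foldl (fun acc x => PySem.List.insertBy (fun a b => decide (key b < key a)) x acc)
          (acc.filter p)
  | [], acc, _ => by simp
  | x :: xs, acc, hacc => by
      have hih := pvFoldl_ins_filter key Hasym Hlelt p xs
        (PySem.List.insertBy (fun a b => decide (key b < key a)) x acc)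
        (pvPairwise_insertBy key Hasym Hlelt x acc hacc)
      by_cases hpx : p x = true
      · have h1 : (PySem.List.insertBy (fun a b => decide (key b < key a)) x acc).filter p
            = PySem.List.insertBy (fun a b => decide (key b < key a)) x (acc.filter p) :=
          pvFilter_insertBy_pos key Hlelt p x hpx acc hacc
        simp [List.foldl_cons, hih, h1, hpx]
      · have h1 : (PySem.List.insertBy (fun a b => decide (key b < key a)) x acc).filter p
            = acc.filter p := pvFilter_insertBy_neg _ p x (by simpa using hpx) acc
        simp [List.foldl_cons, hih, h1, hpx]

-- filtering commutes with the stable reverse sort (p never looks at the key order)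
theorem pvFilter_sorted_rev {α κ : Type} [LT κ] [DecidableLT κ] (key : α → κ)
    (Hasym : ∀ a b : κ, a < b → ¬ b < a)
    (Hlelt : ∀ a b c : κ, ¬ b < a → b < c → a < c)
    (p : α → Bool) (xs : List α) :
    (PySem.List.sorted xs key true).filter p = PySem.List.sorted (xs.filter p) key true := by
  rw [PySem.List.sorted_rev_eq_foldl_insertBy, PySem.List.sorted_rev_eq_foldl_insertBy]
  simpa using pvFoldl_ins_filter key Hasym Hlelt p xs [] List.Pairwise.nil

theorem pvInsertBy_map {α β : Type} (b : α → α → Bool) (f : β → α) (x : β) :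
    ∀ l : List β, PySem.List.insertBy b (f x) (l.map f)
      = (PySem.List.insertBy (fun u v => b (f u) (f v)) x l).map f
  | [] => rfl
  | y :: ys => by
      by_cases hb : b (f x) (f y) = true
      · simp [PySem.List.insertBy, hb]
      · simp [PySem.List.insertBy, hb, pvInsertBy_map b f x ys]

theorem pvFoldl_ins_map {α β : Type} (b : α → α → Bool) (f : β → α) :
    ∀ (l : List β) (acc : List β),
    l.foldl (fun acc x => PySem.List.insertBy b (f x) acc) (acc.map f)
      = (l.foldl (fun acc x => PySem.List.insertBy (fun u v => b (f u) (f v)) x acc) acc).map f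
  | [], acc => rfl
  | x :: xs, acc => by
      simp only [List.foldl_cons, pvInsertBy_map b f x acc]
      exact pvFoldl_ins_map b f xs _

-- sorting a mapped list = mapping the list sorted by the composed key
theorem pvSorted_map {α β κ : Type} [LT κ] [DecidableLT κ] (f : β → α) (key : α → κ)
    (l : List β) :
    PySem.List.sorted (l.map f) key false
      = (PySem.List.sorted l (fun x => key (f x)) false).map f := by
  rw [PySem.List.sorted_eq_foldl_insertBy, PySem.List.sorted_eq_foldl_insertBy, List.foldl_map]
  simpa using pvFoldl_ins_map (fun a b => decide (key a < key b)) f l []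

-- the grouping fold's bucket at k is the filter of the input by name
theorem pvGroups_getD (templates : List (List (String × String)))
    (d : PySem.Dict String (List (List (String × String)))) (k : String) :
    (templates.foldl (fun d t => d.modify (pvGet t "name") [] (fun vs => vs ++ [t])) d).getD k []
      = d.getD k [] ++ templates.filter (fun t => pvGet t "name" == k) := by
  have h := PySem.Dict.getD_foldl_modify_append
    (templates.map (fun t => (pvGet t "name", t))) d k
  rw [List.foldl_map] at h
  simpa [List.filter_map, Function.comp_def] using h

-- the common normal form of both programs
def pvNF (templates : List (List (String × String))) : List (String × List (List (String × String))) :=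
  (PySem.List.sorted (PySem.Set.ofList (templates.map (fun t => pvGet t "name")))
      (fun n => PySem.Str.lower n) false).map
    (fun k => (k, PySem.List.sorted (templates.filter (fun t => pvGet t "name" == k)) pvVKey true))

theorem pvHasym {kappa : Type} [LinearOrder kappa] : ∀ a b : kappa, a < b → ¬ b < a :=
  fun _ _ h => lt_asymm h

theorem pvHlelt {kappa : Type} [LinearOrder kappa] : ∀ a b c : kappa, ¬ b < a → b < c → a < c :=
  fun _ _ _ h1 h2 => lt_of_le_of_lt (not_lt.mp h1) h2

theorem pvSortedN_nodup (templates : List (List (String × String))) :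
    (PySem.List.sorted (PySem.Set.ofList (templates.map (fun t => pvGet t "name")))
      (fun n => PySem.Str.lower n) false).Nodup := by
  have hp := PySem.List.sorted_perm (PySem.Set.ofList (templates.map (fun t => pvGet t "name")))
    (fun n => PySem.Str.lower n) false
  exact hp.nodup_iff.mpr (PySem.Set.nodup_ofList _)

-- items of a dict built from pairs with distinct first components is that pair list
theorem pvOfList_items (L : List (String × List (List (String × String))))
    (h : (L.map Prod.fst).Nodup) : (PySem.Dict.ofList L).items = L := by
  have h2 := PySem.Dict.items_foldl_insert_fresh L (fun p => p.1) (fun p => p.2)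
    PySem.Dict.empty (fun a _ => PySem.Dict.contains_empty _) (by simpa using h)
  simpa [PySem.Dict.ofList, PySem.Dict.update] using h2

theorem pvA_eq (templates : List (List (String × String))) :
    group_by_name_py templates = pvNF templates := by
  simp only [group_by_name_py, pvNF]
  set G := templates.foldl
    (fun d t => d.modify (pvGet t "name") [] (fun vs => vs ++ [t]))
    (PySem.Dict.empty : PySem.Dict String (List (List (String × String)))) with hG
  have hGkeys : G.keys = PySem.Set.ofList (templates.map (fun t => pvGet t "name")) := by
    have h := PySem.Dict.keys_foldl_modify_key templates (fun t => pvGet t "name")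
      ([] : List (List (String × String))) (fun _ t vs => vs ++ [t]) PySem.Dict.empty
    simpa [PySem.Dict.keys_empty, PySem.Set.update_nil_left] using h
  have hGnodup : G.keys.Nodup :=
    PySem.Dict.nodup_keys_foldl_modify_key templates (fun t => pvGet t "name")
      ([] : List (List (String × String))) (fun _ t vs => vs ++ [t]) PySem.Dict.empty
      (PySem.Dict.nodup_keys_empty)
  have hGgetD : ∀ k, G.getD k [] = templates.filter (fun t => pvGet t "name" == k) := by
    intro k
    have h := pvGroups_getD templates PySem.Dict.empty k
    simpa using h
  rw [PySem.Dict.items_eq_map_keys G hGnodup [], hGkeys,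
    pvSorted_map (fun k => (k, G.getD k [])) (fun kv => PySem.Str.lower kv.1)]
  rw [List.map_map]
  have hcomp : ((fun kv => (kv.1, PySem.List.sorted kv.2 pvVKey true)) ∘
      (fun k => (k, G.getD k [])))
      = fun k => (k, PySem.List.sorted (templates.filter (fun t => pvGet t "name" == k)) pvVKey true) :=
    funext fun k => by simp [Function.comp, hGgetD k]
  rw [hcomp]
  have hkey : (fun x => PySem.Str.lower (x, G.getD x []).1) = (fun n : String => PySem.Str.lower n) := rfl
  rw [hkey]
  apply pvOfList_items
  simp only [List.map_map]
  have hfst : (Prod.fst ∘ fun k =>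
      (k, PySem.List.sorted (templates.filter (fun t => pvGet t "name" == k)) pvVKey true))
      = fun k => k := funext fun k => rfl
  rw [hfst]
  simpa using pvSortedN_nodup templates

theorem pvB_eq (templates : List (List (String × String))) :
    group_by_name_py_alt templates = pvNF templates := by
  simp only [group_by_name_py_alt, pvNF, PySem.List.dedup_eq_ofList]
  set names := PySem.List.sorted (PySem.Set.ofList (templates.map (fun t => pvGet t "name")))
    (fun n => PySem.Str.lower n) false with hnames
  have hnamesNodup : names.Nodup := pvSortedN_nodup templates
  set out0 := names.foldl (fun d n => d.insert n [])
    (PySem.Dict.empty : PySem.Dict String (List (List (String × String)))) with hout0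
  have h0items : out0.items = names.map (fun n => (n, ([] : List (List (String × String))))) := by
    have h := PySem.Dict.items_foldl_insert_fresh names (fun n => n)
      (fun _ => ([] : List (List (String × String)))) PySem.Dict.empty
      (fun a _ => PySem.Dict.contains_empty _) (by simpa using hnamesNodup)
    simpa using h
  have h0keys : out0.keys = names := by
    have h := PySem.Dict.keys_foldl_insert names
      (fun _ _ => ([] : List (List (String × String)))) PySem.Dict.empty
    rw [hout0]
    simp only [PySem.Dict.keys_empty, PySem.Set.update_nil_left] at h
    rw [h]
    exact PySem.Set.ofList_eq_self_of_nodup _ hnamesNodup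
  have h0nodup : out0.keys.Nodup := by rw [h0keys]; exact hnamesNodup
  set out := (PySem.List.sorted templates pvVKey true).foldl
    (fun d t => d.modify (pvGet t "name") [] (fun vs => vs ++ [t])) out0 with hout
  have houtkeys : out.keys = names := by
    have h := PySem.Dict.keys_foldl_modify_key (PySem.List.sorted templates pvVKey true)
      (fun t => pvGet t "name") ([] : List (List (String × String)))
      (fun _ t vs => vs ++ [t]) out0
    rw [hout, h, h0keys, PySem.Set.update_eq_append_filter]
    have hnil : List.filter (fun y => !PySem.Set.contains names y)
        (PySem.Set.ofList ((PySem.List.sorted templates pvVKey true).map (fun t => pvGet t "name"))) = [] := by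
      rw [List.filter_eq_nil_iff]
      intro a ha
      have ha2 : a ∈ (PySem.List.sorted templates pvVKey true).map (fun t => pvGet t "name") :=
        (PySem.Set.mem_ofList _ _).mp ha
      rcases List.mem_map.mp ha2 with ⟨t, ht, rfl⟩
      have ht2 : t ∈ templates := (PySem.List.mem_sorted _ _ _ _).mp ht
      have hmem : pvGet t "name" ∈ names := by
        rw [hnames, PySem.List.mem_sorted]
        exact (PySem.Set.mem_ofList _ _).mpr (List.mem_map.mpr ⟨t, ht2, rfl⟩)
      simpa using hmem
    rw [hnil, List.append_nil]
  have houtnodup : out.keys.Nodup := by rw [houtkeys]; exact hnamesNodup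
  have h00 : ∀ k, out0.getD k ([] : List (List (String × String))) = [] := by
    intro k
    by_cases hc : out0.contains k = true
    · have hk : k ∈ out0.keys := (PySem.Dict.contains_iff_mem_keys _ _).mp hc
      rw [h0keys] at hk
      have hm : (k, ([] : List (List (String × String)))) ∈ out0.items := by
        rw [h0items]; exact List.mem_map.mpr ⟨k, hk, rfl⟩
      exact PySem.Dict.getD_of_mem_items _ hm h0nodup []
    · exact PySem.Dict.getD_of_not_contains _ _ (by simpa using hc)
  have houtgetD : ∀ k, out.getD k ([] : List (List (String × String)))
      = PySem.List.sorted (templates.filter (fun t => pvGet t "name" == k)) pvVKey true := by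
    intro k
    rw [hout, pvGroups_getD, h00, List.nil_append,
      pvFilter_sorted_rev pvVKey pvHasym pvHlelt]
  rw [PySem.Dict.items_eq_map_keys out houtnodup [], houtkeys]
  exact List.map_congr_left fun k _ => by rw [houtgetD k]

theorem group_by_name_py_spec_aux (templates : List (List (String × String))) :
    group_by_name_py templates = group_by_name_py_alt templates := by
  rw [pvA_eq, pvB_eq]

-- ===== VERDICT (by name: the statement is the Claim_ definition above) =====
theorem group_by_name_py_spec : Claim_equal_group_by_name_py := by
  intro templates _ _
  unfold Spec_group_by_name_py
  exact group_by_name_py_spec_aux templates
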